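-- pv_equiv track=rewrite | github.com/hugorodrigues99/advent-of-code | 4/part1.py | getCardPoints
-- ===== SOURCE A (Python) =====
-- def getCardPoints(winningNumbers, numbers):
--     cardPoints = 0
--
--     for number in numbers:
--         if number == "":
--             continue
--         if number in winningNumbers:
--             if cardPoints != 0:
--                 cardPoints *= 2
--             else:
--                 cardPoints = 1
--
--     return cardPoints
-- ===== SOURCE B (Python) =====
-- def getCardPoints(winningNumbers, numbers):
--     k = sum(numbers.count(x) for x in set(winningNumbers) if x != "")
--     return 2 ** (k - 1) if k else 0
-- ===== Notes on version B (the rewrite author's own statement) =====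
-- stated objective: alternative
-- what changed: Flips the loop orientation: instead of scanning numbers with a running-doubling accumulator, B deduplicates winningNumbers into a set, sums numbers.count(x) over its non-empty elements, and returns the closed form 2**(k-1).
import Mathlib
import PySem

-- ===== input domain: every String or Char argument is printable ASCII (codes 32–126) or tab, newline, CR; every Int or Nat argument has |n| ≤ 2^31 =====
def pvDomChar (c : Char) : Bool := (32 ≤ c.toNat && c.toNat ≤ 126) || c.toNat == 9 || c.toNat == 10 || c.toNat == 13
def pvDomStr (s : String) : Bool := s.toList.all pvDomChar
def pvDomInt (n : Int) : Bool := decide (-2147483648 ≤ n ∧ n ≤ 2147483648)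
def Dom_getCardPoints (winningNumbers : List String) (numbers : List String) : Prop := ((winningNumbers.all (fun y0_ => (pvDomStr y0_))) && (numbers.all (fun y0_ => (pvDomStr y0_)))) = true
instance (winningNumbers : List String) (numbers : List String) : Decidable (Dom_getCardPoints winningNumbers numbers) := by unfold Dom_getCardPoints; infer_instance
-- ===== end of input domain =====

-- B flips the loop: sum numbers.count(x) over set(winningNumbers) minus "", then one closed-form exponentiation (alternative).


-- ===== PORT A =====
-- literal transliteration: loop over numbers with the accumulator cardPoints
def getCardPoints (winningNumbers : List String) (numbers : List String) : Int :=
  numbers.foldl (fun cardPoints number =>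
    if number = "" then cardPoints
    else if winningNumbers.contains number then
      (if cardPoints ≠ 0 then cardPoints * 2 else 1)
    else cardPoints) 0

-- ===== PORT B =====
-- sum numbers.count(x) over the non-empty elements of set(winningNumbers); then one exponentiation
def getCardPoints_alt (winningNumbers : List String) (numbers : List String) : Int :=
  let k := (((PySem.Set.ofList winningNumbers).filter (fun x => x ≠ "")).map
              (fun x => numbers.count x)).sum
  if k ≠ 0 then (2 : Int) ^ (k - 1) else 0

-- ===== PRECONDITION & SPEC =====
def Spec_getCardPoints (winningNumbers : List String) (numbers : List String) (out : Int) : Prop := out = getCardPoints_alt winningNumbers numbers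
instance (winningNumbers : List String) (numbers : List String) (out : Int) : Decidable (Spec_getCardPoints winningNumbers numbers out) := by unfold Spec_getCardPoints; infer_instance

-- ===== CLAIM =====
def Claim_equal_getCardPoints : Prop := ∀ (winningNumbers : List String) (numbers : List String), Dom_getCardPoints winningNumbers numbers → Spec_getCardPoints winningNumbers numbers (getCardPoints winningNumbers numbers)

-- ===== LEMMAS AND PROOFS =====

-- A's loop step
def pvStepA (winningNumbers : List String) (cardPoints : Int) (number : String) : Int :=
  if number = "" then cardPoints
  else if winningNumbers.contains number then
    (if cardPoints ≠ 0 then cardPoints * 2 else 1)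
  else cardPoints

-- invariant: from a positive accumulator a, A's loop multiplies a by 2^(number of matches)
theorem foldl_stepA_pos (w : List String) (ns : List String) (a : Int) (ha : 0 < a) :
    ns.foldl (pvStepA w) a = a * 2 ^ (ns.countP (fun n => n ≠ "" && w.contains n)) := by
  induction ns generalizing a with
  | nil => simp
  | cons n ns ih =>
    rw [List.foldl_cons, List.countP_cons]
    by_cases h1 : n = ""
    · rw [show pvStepA w a n = a by simp [pvStepA, h1], ih a ha]
      simp [h1]
    · by_cases h2 : w.contains n
      · have hne : a ≠ 0 := ne_of_gt ha
        have h2m : n ∈ w := by simpa using h2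
        rw [show pvStepA w a n = a * 2 by simp [pvStepA, h1, h2m, hne],
            ih (a * 2) (by positivity),
            show (decide (n ≠ "") && w.contains n) = true by simp [h1, h2m]]
        rw [if_pos rfl, pow_succ]; ring
      · have h2m : n ∉ w := by simpa using h2
        rw [show pvStepA w a n = a by simp [pvStepA, h1, h2m], ih a ha,
            show (decide (n ≠ "") && w.contains n) = false by simp [h1, h2m]]
        simp

-- A's value in terms of the match count over numbers
theorem foldl_stepA_zero (w : List String) (ns : List String) :
    ns.foldl (pvStepA w) 0 =
      (if ns.countP (fun n => n ≠ "" && w.contains n) ≠ 0 then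
         (2:Int) ^ (ns.countP (fun n => n ≠ "" && w.contains n) - 1)
       else 0) := by
  induction ns with
  | nil => simp
  | cons n ns ih =>
    rw [List.foldl_cons, List.countP_cons]
    by_cases h1 : n = ""
    · rw [show pvStepA w 0 n = 0 by simp [pvStepA, h1], ih]
      simp [h1]
    · by_cases h2 : w.contains n
      · have h2m : n ∈ w := by simpa using h2
        rw [show pvStepA w (0:Int) n = 1 by simp [pvStepA, h1, h2m],
            foldl_stepA_pos w ns 1 one_pos,
            show (decide (n ≠ "") && w.contains n) = true by simp [h1, h2m]]
        rw [if_pos rfl, if_pos (Nat.succ_ne_zero _)]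
        simp
      · have h2m : n ∉ w := by simpa using h2
        rw [show pvStepA w (0:Int) n = 0 by simp [pvStepA, h1, h2m], ih,
            show (decide (n ≠ "") && w.contains n) = false by simp [h1, h2m]]
        simp

-- Σ_{x ∈ S} [x = n] = [n ∈ S] for duplicate-free S
theorem sum_indicator_nodup (S : List String) (hS : S.Nodup) (n : String) :
    (S.map (fun x => if x = n then 1 else 0)).sum = (if n ∈ S then 1 else 0) := by
  induction S with
  | nil => simp
  | cons y S ih =>
    rcases List.nodup_cons.mp hS with ⟨hy, hS'⟩
    rw [List.map_cons, List.sum_cons, ih hS']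
    by_cases h : y = n
    · subst h
      rw [if_pos rfl, if_neg hy, if_pos (List.mem_cons_self)]
    · rw [if_neg h]
      by_cases hm : n ∈ S
      · rw [if_pos hm, if_pos (List.mem_cons_of_mem y hm)]
      · rw [if_neg hm, if_neg (by simp [Ne.symm h, hm])]

-- flipping the loop: for S without duplicates, Σ_{x ∈ S} ns.count x = #{n ∈ ns | n ∈ S}
theorem sum_count_eq_countP (S : List String) (hS : S.Nodup) (ns : List String) :
    (S.map (fun x => ns.count x)).sum = ns.countP (fun n => S.contains n) := by
  induction ns with
  | nil => simp
  | cons n ns ih =>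
    rw [List.countP_cons]
    have hcnt : ∀ x, (n :: ns).count x = ns.count x + (if x = n then 1 else 0) := by
      intro x; rw [List.count_cons]; congr 1
      by_cases h : x = n
      · rw [if_pos (by simp [h]), if_pos h]
      · rw [if_neg (by simp [Ne.symm h]), if_neg h]
    calc (S.map (fun x => (n :: ns).count x)).sum
        = (S.map (fun x => ns.count x + (if x = n then 1 else 0))).sum := by
          congr 1; exact List.map_congr_left (fun x _ => hcnt x)
      _ = (S.map (fun x => ns.count x)).sum + (S.map (fun x => if x = n then 1 else 0)).sum := by
          rw [← List.sum_map_add]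
      _ = ns.countP (fun n => S.contains n) + (if S.contains n then 1 else 0) := by
          rw [ih, sum_indicator_nodup S hS n]
          by_cases hmem : n ∈ S <;> simp [hmem]

-- the deduplicated filtered winning list tests the same membership as A's
theorem contains_filter_ofList (w : List String) (n : String) :
    (((PySem.Set.ofList w).filter (fun x => x ≠ "")).contains n)
      = (decide (n ≠ "") && w.contains n) := by
  simp only [List.contains_eq_mem, List.mem_filter]
  by_cases h1 : n = "" <;> by_cases h2 : n ∈ w <;>
    simp [h1, h2, PySem.Set.mem_ofList]

-- ===== VERDICT =====
theorem getCardPoints_spec : Claim_equal_getCardPoints := by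
  intro w ns _
  show getCardPoints w ns = getCardPoints_alt w ns
  unfold getCardPoints getCardPoints_alt
  have hnd : ((PySem.Set.ofList w).filter (fun x => x ≠ "")).Nodup :=
    (PySem.Set.nodup_ofList w).filter _
  rw [sum_count_eq_countP _ hnd ns]
  have : (fun n => ((PySem.Set.ofList w).filter (fun x => x ≠ "")).contains n)
       = (fun n => decide (n ≠ "") && w.contains n) := by
    funext n; exact contains_filter_ofList w n
  rw [this]
  exact foldl_stepA_zero w ns
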